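-- pv_equiv track=rewrite | github.com/rkoco/ASP-MAPF | run_problem.py | check_makespan
-- ===== SOURCE A (Python) =====
-- def check_makespan(sol):
--     makespan = -1
--     for ag in sol:
--         last_x = -1
--         last_y = -1
--         step = 0
--         wait_on_goal = 0
--         for pos in ag:
--             if last_x == pos[0] and last_y == pos[1]:
--                 wait_on_goal += 1
--             else:
--                 wait_on_goal = 0
--
--             last_x = pos[0]
--             last_y = pos[1]
--
--             step+=1
--
--         ag_makespan = step - wait_on_goal
--         if ag_makespan > makespan:
--             makespan = ag_makespan
--
--     return makespan
-- ===== SOURCE B (Python) =====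
-- def check_makespan(sol):
--     makespan = -1
--     for ag in sol:
--         ag_makespan = len(ag)
--         for i in range(len(ag) - 1, 0, -1):
--             if ag[i][0] == ag[i - 1][0] and ag[i][1] == ag[i - 1][1]:
--                 ag_makespan -= 1
--             else:
--                 break
--         if ag_makespan > makespan:
--             makespan = ag_makespan
--     return makespan
-- ===== Notes on version B (the rewrite author's own statement) =====
-- stated objective: alternative
-- what changed: B replaces A's forward pass with running last_x/last_y/step/wait counters by a backward early-terminating scan of the trailing goal-wait run (ag_makespan = len(ag) minus the trailing run, found from the end with break).
-- intended difference: On solutions in which every agent path is empty or a constant run at position (-1,-1) (with at least one such run), A's sentinel last=(-1,-1) makes the very first step count as a goal-wait and A returns 0, while B returns 1, the intended makespan of a one-step plan: (-1,-1) is a legitimate position and the sentinel collision is accidental. — e.g. on check_makespan([[(-1, -1)]]): A returns 0, B returns 1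
import Mathlib
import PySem

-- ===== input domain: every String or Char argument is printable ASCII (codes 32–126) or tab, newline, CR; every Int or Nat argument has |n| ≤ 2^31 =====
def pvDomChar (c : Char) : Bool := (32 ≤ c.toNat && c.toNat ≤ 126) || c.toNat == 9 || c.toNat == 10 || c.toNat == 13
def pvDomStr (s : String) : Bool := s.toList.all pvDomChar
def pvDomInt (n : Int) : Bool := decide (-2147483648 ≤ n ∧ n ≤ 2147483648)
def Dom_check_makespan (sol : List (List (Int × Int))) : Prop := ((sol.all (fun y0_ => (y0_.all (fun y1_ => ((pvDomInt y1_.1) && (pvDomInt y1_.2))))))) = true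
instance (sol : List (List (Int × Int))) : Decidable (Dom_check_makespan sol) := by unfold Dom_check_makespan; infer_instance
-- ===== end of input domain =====

-- B scans each agent's path backwards (with early break) instead of A's forward
-- running-counter pass; equivalence is proved outside D_ (A's last=(-1,-1) sentinel corner).

-- ===== PORT A =====
-- inner-loop body of A: state ((last_x, last_y), step, wait_on_goal)
def stepA (s : (Int × Int) × Int × Int) (pos : Int × Int) : (Int × Int) × Int × Int :=
  ((pos.1, pos.2), s.2.1 + 1, if s.1.1 = pos.1 ∧ s.1.2 = pos.2 then s.2.2 + 1 else 0)

def check_makespan (sol : List (List (Int × Int))) : Int :=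
  sol.foldl (fun makespan ag =>
    let st := ag.foldl stepA ((-1, -1), 0, 0)
    let ag_makespan := st.2.1 - st.2.2
    if ag_makespan > makespan then ag_makespan else makespan) (-1)

-- ===== PORT B =====
-- backward scan of Source B's `for i in range(len(ag)-1, 0, -1)` with break: the reversed
-- path is scanned from the end of the path, counting while consecutive x/y agree.
def trailRun : List (Int × Int) → Int
  | a :: b :: rest => if a.1 = b.1 ∧ a.2 = b.2 then trailRun (b :: rest) + 1 else 0
  | _ => 0

def check_makespan_alt (sol : List (List (Int × Int))) : Int :=
  sol.foldl (fun makespan ag =>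
    let ag_makespan := (ag.length : Int) - trailRun ag.reverse
    if ag_makespan > makespan then ag_makespan else makespan) (-1)

-- ===== PRECONDITION & SPEC =====
-- a nonempty agent path waiting at (-1,-1) the whole time
def pvDeg (ag : List (Int × Int)) : Bool :=
  !ag.isEmpty && ag.all (fun p => p.1 == -1 && p.2 == -1)

-- On solutions in which every agent path is empty or a constant run at (-1,-1) (at least
-- one such run), A's sentinel last=(-1,-1) makes the first step count as a goal-wait and A
-- returns 0, while B returns 1, the intended makespan of a one-step plan.
def D_check_makespan (sol : List (List (Int × Int))) : Prop :=
  (sol.any pvDeg && sol.all (fun ag => ag.isEmpty || pvDeg ag)) = true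
instance (sol : List (List (Int × Int))) : Decidable (D_check_makespan sol) := by
  unfold D_check_makespan; infer_instance

def Spec_check_makespan (sol : List (List (Int × Int))) (out : Int) : Prop :=
  ¬ D_check_makespan sol → out = check_makespan_alt sol
instance (sol : List (List (Int × Int))) (out : Int) : Decidable (Spec_check_makespan sol out) := by
  unfold Spec_check_makespan; infer_instance

def pvDiffWitness_check_makespan : (List (List (Int × Int))) := [[(-1, -1)]]
def pvDiffWitnessOut_check_makespan : Int × Int := (0, 1)

-- ===== CLAIM (what is proved, stated in full; the proofs are below) =====
def Claim_unchanged_check_makespan : Prop := ∀ (sol : List (List (Int × Int))), Dom_check_makespan sol → Spec_check_makespan sol (check_makespan sol)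
def Claim_changed_check_makespan : Prop := Dom_check_makespan (pvDiffWitness_check_makespan) ∧ D_check_makespan (pvDiffWitness_check_makespan) ∧ check_makespan (pvDiffWitness_check_makespan) = pvDiffWitnessOut_check_makespan.1 ∧ check_makespan_alt (pvDiffWitness_check_makespan) = pvDiffWitnessOut_check_makespan.2 ∧ pvDiffWitnessOut_check_makespan.1 ≠ pvDiffWitnessOut_check_makespan.2
def Claim_exact_check_makespan : Prop := ∀ (sol : List (List (Int × Int))), Dom_check_makespan sol → D_check_makespan sol → check_makespan sol ≠ check_makespan_alt sol

-- ===== LEMMAS AND PROOFS =====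

-- wait_on_goal after A's inner loop, from previous position prev and counter w
def wf (prev : Int × Int) (w : Int) : List (Int × Int) → Int
  | [] => w
  | p :: l => wf p (if prev.1 = p.1 ∧ prev.2 = p.2 then w + 1 else 0) l

def lastD (d : Int × Int) : List (Int × Int) → (Int × Int)
  | [] => d
  | p :: l => lastD p l

theorem foldA_char (ag : List (Int × Int)) (prev : Int × Int) (s w : Int) :
    ag.foldl stepA (prev, s, w) = (lastD prev ag, s + ag.length, wf prev w ag) := by
  induction ag generalizing prev s w with
  | nil => simp [lastD, wf]
  | cons p l ih =>
    simp only [List.foldl_cons, stepA, lastD, wf, List.length_cons]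
    rw [ih]
    simp [Prod.mk.eta]
    omega

theorem trailRun_const (l : List (Int × Int)) (c : Int × Int)
    (h : ∀ x ∈ l, x = c) (hne : l ≠ []) : trailRun l = (l.length : Int) - 1 := by
  induction l with
  | nil => simp at hne
  | cons a t ih =>
    cases t with
    | nil => simp [trailRun]
    | cons b t' =>
      have ha : a = c := h a (by simp)
      have hb : b = c := h b (by simp)
      rw [trailRun, if_pos (by rw [ha, hb]; exact ⟨rfl, rfl⟩),
          ih (fun x hx => h x (List.mem_cons_of_mem a hx)) (by simp)]
      simp only [List.length_cons]
      push_cast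
      ring

theorem trailRun_append_break (m : List (Int × Int)) (p : Int × Int)
    (hne : m ≠ []) (h : ¬ ∀ x ∈ m, x = p) : trailRun (m ++ [p]) = trailRun m := by
  induction m with
  | nil => simp at hne
  | cons a t ih =>
    cases t with
    | nil =>
      have hap : a ≠ p := by intro he; exact h (by simp [he])
      have : ¬ (a.1 = p.1 ∧ a.2 = p.2) := by
        intro hc; exact hap (Prod.ext hc.1 hc.2)
      simp [trailRun, this]
    | cons b t' =>
      by_cases hab : a.1 = b.1 ∧ a.2 = b.2
      · have hrec : trailRun (b :: t' ++ [p]) = trailRun (b :: t') := by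
          apply ih (by simp)
          intro hall
          apply h
          intro x hx
          rcases List.mem_cons.mp hx with hxa | hxbt
          · have hbp : b = p := hall b (by simp)
            rw [hxa, Prod.ext hab.1 hab.2, hbp]
          · exact hall x hxbt
        simp only [List.cons_append, trailRun, if_pos hab] at *
        rw [hrec]
      · simp only [List.cons_append, trailRun, if_neg hab]

theorem wf_eq (ag : List (Int × Int)) (prev : Int × Int) (w : Int) :
    wf prev w ag = if ∀ p ∈ ag, p = prev then w + ag.length else trailRun ag.reverse := by
  induction ag generalizing prev w with
  | nil => simp [wf]
  | cons p l ih =>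
    rw [wf, ih]
    by_cases hall : ∀ q ∈ l, q = p
    · by_cases hc : prev.1 = p.1 ∧ prev.2 = p.2
      · have hpp : p = prev := (Prod.ext hc.1 hc.2).symm
        rw [if_pos hall, if_pos hc, if_pos (fun q hq => by
              rcases List.mem_cons.mp hq with h1 | h2
              · rw [h1, hpp]
              · rw [hall q h2, hpp])]
        simp only [List.length_cons]
        push_cast
        ring
      · have hne_cond : ¬ ∀ q ∈ p :: l, q = prev := by
          intro hcon
          have hp := hcon p (by simp)
          exact hc (by rw [hp]; exact ⟨rfl, rfl⟩)
        rw [if_pos hall, if_neg hc, if_neg hne_cond, List.reverse_cons]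
        cases l with
        | nil => simp [trailRun]
        | cons x t =>
          have hallrev : ∀ y ∈ (x :: t).reverse ++ [p], y = p := by
            intro y hy
            rcases List.mem_append.mp hy with h1 | h2
            · exact hall y (List.mem_reverse.mp h1)
            · simpa using h2
          rw [trailRun_const _ p hallrev (by simp)]
          simp
          omega
    · have hlne : l ≠ [] := fun he => hall (by rw [he]; simp)
      have hne_cond : ¬ ∀ q ∈ p :: l, q = prev := by
        intro hcon
        exact hall (fun q hq =>
          (hcon q (List.mem_cons_of_mem p hq)).trans (hcon p (by simp)).symm)
      rw [if_neg hall, if_neg hne_cond, List.reverse_cons,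
          trailRun_append_break _ _ (by simpa using hlne)
            (fun hcon => hall (fun q hq => hcon q (List.mem_reverse.mpr hq)))]

-- the per-agent value computed by B
def valB (ag : List (Int × Int)) : Int := (ag.length : Int) - trailRun ag.reverse

-- the per-agent value computed by A equals valB except on degenerate agents, where it is 0
theorem agmA_eq (ag : List (Int × Int)) :
    (ag.foldl stepA ((-1, -1), 0, 0)).2.1 - (ag.foldl stepA ((-1, -1), 0, 0)).2.2
      = if pvDeg ag then 0 else valB ag := by
  rw [foldA_char]
  simp only [wf_eq, zero_add]
  by_cases hall : ∀ p ∈ ag, p = ((-1 : Int), (-1 : Int))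
  · cases ag with
    | nil => simp [pvDeg, valB, trailRun]
    | cons x t =>
      have hdeg : pvDeg (x :: t) = true := by
        unfold pvDeg
        simp only [List.isEmpty_cons, Bool.not_false, Bool.true_and, List.all_eq_true]
        intro p hp
        have := hall p hp
        simp [this]
      rw [if_pos hall, hdeg]
      simp
  · have hdeg : pvDeg ag = false := by
      by_contra hcon
      simp only [Bool.not_eq_false] at hcon
      apply hall
      intro p hp
      unfold pvDeg at hcon
      simp only [Bool.and_eq_true, List.all_eq_true] at hcon
      have := hcon.2 p hp
      simp only [beq_iff_eq] at this
      exact Prod.ext this.1 this.2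
    rw [if_neg hall, hdeg]
    simp [valB]

-- generic facts about A/B's outer running-max loop
theorem fold_ext {α : Type} (f g : Int → α → Int) (l : List α) (i : Int)
    (h : ∀ m a, a ∈ l → f m a = g m a) : l.foldl f i = l.foldl g i := by
  induction l generalizing i with
  | nil => rfl
  | cons a t ih =>
    simp only [List.foldl_cons]
    rw [h i a (by simp)]
    exact ih _ (fun m b hb => h m b (by simp [hb]))

def foldMax (h : List (Int × Int) → Int) (i : Int) (l : List (List (Int × Int))) : Int :=
  l.foldl (fun m ag => if h ag > m then h ag else m) i

theorem le_foldMax_init (h : List (Int × Int) → Int) (l : List (List (Int × Int))) (i : Int) :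
    i ≤ foldMax h i l := by
  induction l generalizing i with
  | nil => simp [foldMax]
  | cons a t ih =>
    simp only [foldMax, List.foldl_cons]
    have := ih (i := if h a > i then h a else i)
    split_ifs at * <;> simp [foldMax] at * <;> omega

theorem le_foldMax_mem (h : List (Int × Int) → Int) (l : List (List (Int × Int))) (i : Int)
    (ag : List (Int × Int)) (hm : ag ∈ l) : h ag ≤ foldMax h i l := by
  induction l generalizing i with
  | nil => simp at hm
  | cons a t ih =>
    simp only [foldMax, List.foldl_cons]
    rcases List.mem_cons.mp hm with he | ht
    · subst he
      calc h ag ≤ (if h ag > i then h ag else i) := by split_ifs <;> omega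
        _ ≤ _ := le_foldMax_init _ _ _
    · exact ih _ ht
  
theorem foldMax_le (h : List (Int × Int) → Int) (l : List (List (Int × Int))) (i c : Int)
    (hi : i ≤ c) (hall : ∀ ag ∈ l, h ag ≤ c) : foldMax h i l ≤ c := by
  induction l generalizing i with
  | nil => simpa [foldMax]
  | cons a t ih =>
    simp only [foldMax, List.foldl_cons]
    apply ih
    · have := hall a (by simp)
      split_ifs <;> omega
    · exact fun ag hag => hall ag (by simp [hag])

-- port expressions as foldMax
def hA (ag : List (Int × Int)) : Int := if pvDeg ag then 0 else valB ag

theorem portA_eq (sol : List (List (Int × Int))) :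
    check_makespan sol = foldMax hA (-1) sol := by
  unfold check_makespan foldMax
  apply fold_ext
  intro m ag _
  simp only [hA, ← agmA_eq ag]

theorem portB_eq (sol : List (List (Int × Int))) :
    check_makespan_alt sol = foldMax valB (-1) sol := by
  unfold check_makespan_alt foldMax
  apply fold_ext
  intro m ag _
  simp only [valB]

theorem trailRun_cons_le (a : Int × Int) (l : List (Int × Int)) :
    trailRun (a :: l) ≤ (l.length : Int) ∧ 0 ≤ trailRun (a :: l) := by
  induction l generalizing a with
  | nil => simp [trailRun]
  | cons b t ih =>
    have := ih b
    rw [trailRun]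
    split_ifs <;> simp <;> omega

theorem valB_pos (ag : List (Int × Int)) (hne : ag ≠ []) : 1 ≤ valB ag := by
  unfold valB
  cases hrev : ag.reverse with
  | nil => simp at hrev; exact absurd hrev hne
  | cons a t =>
    have hlen : (ag.length : Int) = (t.length : Int) + 1 := by
      have := congrArg List.length hrev
      simp at this
      omega
    have := trailRun_cons_le a t
    omega

theorem pvDeg_ne (ag : List (Int × Int)) (h : pvDeg ag = true) : ag ≠ [] := by
  intro he; rw [he] at h; simp [pvDeg] at h

theorem valB_deg (ag : List (Int × Int)) (h : pvDeg ag = true) : valB ag = 1 := by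
  unfold valB
  have hne := pvDeg_ne ag h
  have hall : ∀ x ∈ ag.reverse, x = ((-1 : Int), (-1 : Int)) := by
    intro x hx
    unfold pvDeg at h
    simp only [Bool.and_eq_true, List.all_eq_true, beq_iff_eq] at h
    have := h.2 x (List.mem_reverse.mp hx)
    exact Prod.ext this.1 this.2
  rw [trailRun_const _ _ hall (by simpa)]
  simp only [List.length_reverse]
  omega

-- ===== VERDICT (by name: the statement is the Claim_ definition above) =====
theorem check_makespan_spec : Claim_unchanged_check_makespan := by
  intro sol _ hD
  rw [portA_eq, portB_eq]
  unfold D_check_makespan at hD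
  simp only [Bool.and_eq_true, not_and_or, List.any_eq_true, List.all_eq_true] at hD
  rcases hD with hnone | hsome
  · -- no degenerate agent: per-agent values coincide
    push_neg at hnone
    apply fold_ext
    intro m ag hag
    have : pvDeg ag = false := by
      have := hnone ag hag
      simpa using this
    simp [hA, this]
  · -- some agent is nonempty and not degenerate; its value ≥ 1 absorbs the 0/1 gap
    push_neg at hsome
    obtain ⟨ag1, hag1, hng⟩ := hsome
    have hng2 : ¬(ag1.isEmpty = true ∨ pvDeg ag1 = true) := by simpa using hng
    have hag1ne : ag1 ≠ [] := by
      intro he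
      exact hng2 (Or.inl (by simp [he]))
    have hag1nd : pvDeg ag1 = false := by
      by_contra hcon
      simp only [Bool.not_eq_false] at hcon
      exact hng2 (Or.inr hcon)
    have h1le : 1 ≤ hA ag1 := by
      rw [hA, hag1nd]
      simp
      exact valB_pos ag1 hag1ne
    apply le_antisymm
    · -- hA ≤ valB pointwise
      apply foldMax_le
      · exact le_foldMax_init _ _ _
      · intro ag hag
        by_cases hd : pvDeg ag = true
        · calc hA ag = 0 := by simp [hA, hd]
            _ ≤ valB ag := by rw [valB_deg ag hd]; omega
            _ ≤ foldMax valB (-1) sol := le_foldMax_mem _ _ _ _ hag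
        · have : pvDeg ag = false := by simpa using hd
          calc hA ag = valB ag := by simp [hA, this]
            _ ≤ foldMax valB (-1) sol := le_foldMax_mem _ _ _ _ hag
          
    · apply foldMax_le
      · exact le_foldMax_init _ _ _
      · intro ag hag
        by_cases hd : pvDeg ag = true
        · calc valB ag = 1 := valB_deg ag hd
            _ ≤ hA ag1 := h1le
            _ ≤ foldMax hA (-1) sol := le_foldMax_mem _ _ _ _ hag1
        · have hf : pvDeg ag = false := by simpa using hd
          calc valB ag = hA ag := by simp [hA, hf]
            _ ≤ foldMax hA (-1) sol := le_foldMax_mem _ _ _ _ hag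

theorem check_makespan_changed : Claim_changed_check_makespan := by
  unfold Claim_changed_check_makespan; decide

theorem check_makespan_tight : Claim_exact_check_makespan := by
  intro sol _ hD
  rw [portA_eq, portB_eq]
  unfold D_check_makespan at hD
  simp only [Bool.and_eq_true, List.any_eq_true, List.all_eq_true] at hD
  obtain ⟨⟨ag0, hag0, hdeg0⟩, hall⟩ := hD
  have hAval : ∀ ag ∈ sol, hA ag = 0 := by
    intro ag hag
    by_cases hd : pvDeg ag = true
    · simp [hA, hd]
    · have hf : pvDeg ag = false := by simpa using hd
      have : ag.isEmpty = true := by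
        have := hall ag hag
        simp [hf] at this
        simpa using this
      have : ag = [] := by simpa [List.isEmpty_iff] using this
      simp [hA, this, valB, trailRun]
  have hBval : ∀ ag ∈ sol, valB ag ≤ 1 := by
    intro ag hag
    by_cases hd : pvDeg ag = true
    · rw [valB_deg ag hd]
    · have hf : pvDeg ag = false := by simpa using hd
      have : ag = [] := by
        have := hall ag hag
        simp [hf] at this
        simpa [List.isEmpty_iff] using this
      simp [this, valB, trailRun]
  have hA0 : foldMax hA (-1) sol = 0 := by
    apply le_antisymm
    · exact foldMax_le _ _ _ _ (by omega) (fun ag hag => le_of_eq (hAval ag hag))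
    · calc (0 : Int) = hA ag0 := (hAval ag0 hag0).symm
        _ ≤ _ := le_foldMax_mem _ _ _ _ hag0
  have hB1 : foldMax valB (-1) sol = 1 := by
    apply le_antisymm
    · exact foldMax_le _ _ _ _ (by omega) hBval
    · calc (1 : Int) = valB ag0 := (valB_deg ag0 hdeg0).symm
        _ ≤ _ := le_foldMax_mem _ _ _ _ hag0
  rw [hA0, hB1]
  omega
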